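-- pv_equiv track=rewrite | github.com/cloud-tsai/zato | code/zato-server/src/zato/server/apispec/parser-prev.py | _parse_sio_desc_lines
-- ===== SOURCE A (Python) =====
-- def _parse_sio_desc_lines(lines:'anylist', new_elem_marker:'str'='*') -> 'anydict':
--     out = {}
--     current_elem = None
--
--     for line in lines: # type: str
--         if line.startswith(new_elem_marker):
--
--             # We will need it later below
--             orig_line = line
--
--             # Remove whitespace, skip the new element marker and the first string left over will be the element name.
--             line_list = [elem for elem in line.split()] # type: strlist
--             line_list.remove(new_elem_marker)
--             current_elem = line_list[0]
--
--             # We have the element name so we can now remove it from the full line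
--             to_remove = '{} {} - '.format(new_elem_marker, current_elem)
--             after_removal = orig_line.replace(to_remove, '', 1)
--             out[current_elem] = [after_removal]
--
--         else:
--             if current_elem:
--                 out[current_elem].append(line)
--
--     # Joing all the lines into a single string, preprocessing them along the way.
--     for key, value in out.items():
--
--         # We need to strip the trailing new line characters from the last element  in the list of lines
--         # because it is redundant and our callers would not want to render it anyway.
--         last = value[-1]
--         last = last.rstrip()
--         value[-1] = last
--
--         # Joing the lines now, honouring new line characters. Also, append whitespace
--         # but only to elements that are not the last in the list because they end a sentence.
--         new_value = []
--         len_value = len(value)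
--         for idx, elem in enumerate(value, 1): # type: (int, str)
--             if idx != len_value and not elem.endswith('\n'):
--                 elem += ' '
--             new_value.append(elem)
--
--         # Everything is preprocesses so we can create a new string now ..
--         new_value = ''.join(new_value) # type: ignore[assignment]
--
--         # .. and set it for that key.
--         out[key] = new_value
--
--     return out
-- ===== SOURCE B (Python) =====
-- def _parse_sio_desc_lines(lines, new_elem_marker='*'):
--     # Single pass: finalize each element's joined string as its boundary is crossed.
--     out = {}
--     current = None  # (elem_name, accumulated_lines)
--
--     def _join(acc):
--         *init, last = acc
--         parts = [e if e.endswith('\n') else e + ' ' for e in init]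
--         return ''.join(parts + [last.rstrip()])
--
--     for line in lines:
--         if line.startswith(new_elem_marker):
--             tokens = line.split()
--             tokens.remove(new_elem_marker)
--             name = tokens[0]
--             first = line.replace('{} {} - '.format(new_elem_marker, name), '', 1)
--             if current:
--                 out[current[0]] = _join(current[1])
--             current = (name, [first])
--         elif current:
--             current[1].append(line)
--
--     if current:
--         out[current[0]] = _join(current[1])
--     return out
-- ===== Notes on version B (the rewrite author's own statement) =====
-- stated objective: alternative
-- what changed: B replaces A's two-phase design (first group lines into a dict of line-lists, then a second loop over the dict that rstrips/joins each list) with a single pass that finalizes each element's joined string when its boundary is crossed, and the join itself is a map over all-but-the-last line plus an rstripped last line instead of A's index-counting enumerate loop.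
import Mathlib
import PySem

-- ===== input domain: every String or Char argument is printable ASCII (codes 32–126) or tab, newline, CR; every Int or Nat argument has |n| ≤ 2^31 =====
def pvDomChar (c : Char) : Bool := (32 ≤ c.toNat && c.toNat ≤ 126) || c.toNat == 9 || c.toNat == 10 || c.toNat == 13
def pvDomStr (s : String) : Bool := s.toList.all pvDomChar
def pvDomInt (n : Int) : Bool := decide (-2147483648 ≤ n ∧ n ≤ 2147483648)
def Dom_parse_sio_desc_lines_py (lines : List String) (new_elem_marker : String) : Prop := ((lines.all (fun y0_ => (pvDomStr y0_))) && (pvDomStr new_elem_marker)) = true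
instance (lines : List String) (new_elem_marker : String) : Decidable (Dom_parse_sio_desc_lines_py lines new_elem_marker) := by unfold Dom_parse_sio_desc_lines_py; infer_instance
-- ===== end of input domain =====

-- B fuses A's two passes (group into a dict of line-lists, then re-iterate the dict to join) into one
-- pass that finalizes each element's joined string at its boundary, with the join done by mapping the
-- initial lines and rstripping only the last; same return value (objective: alternative decomposition).


-- ===== PORT A =====

-- line.replace(pat, '', 1) for a nonempty pat (exact there: remove the first occurrence, if any);
-- used by both ports because both Pythons contain this very call.
def pvReplaceOnce (s pat : List Char) : List Char :=
  let i := PySem.Chars.find s pat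
  if i = -1 then s else s.take i.toNat ++ s.drop (i.toNat + pat.length)

-- The marker-line parsing both Pythons share verbatim: split, tokens.remove(marker), name = tokens[0],
-- first line = line.replace('<marker> <name> - ', '', 1).  none = Python raises (ValueError/IndexError).
def pvParseMarker (new_elem_marker line : String) : Option (String × String) :=
  match PySem.List.remove? (PySem.Str.split₀ line) new_elem_marker with
  | none => none
  | some [] => none
  | some (name :: _) =>
    let toRemove := new_elem_marker.toList ++ (' ' :: name.toList) ++ [' ', '-', ' ']
    some (name, String.ofList (pvReplaceOnce line.toList toRemove))

-- A's second pass, per element: value[-1] = value[-1].rstrip(); then the enumerate(value, 1) loop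
-- appending ' ' to every element that is not last and does not end with '\n'; then ''.join.
def pvJoinA (value : List String) : String :=
  let value := value.dropLast ++ [PySem.Str.rstrip (value.getLastD "")]
  let lenValue := value.length
  let st := value.foldl
    (fun (st : List String × Nat) elem =>
      (st.1 ++ [if st.2 ≠ lenValue ∧ PySem.Str.endswith elem "\n" = false then elem ++ " " else elem],
       st.2 + 1))
    ([], 1)
  PySem.Str.join "" st.1

def parse_sio_desc_lines_py (lines : List String) (new_elem_marker : String) : List (String × String) :=
  -- first loop: group the lines per element into a dict, tracking current_elem
  let st := lines.foldl
    (fun (st : PySem.Dict String (List String) × Option String) line =>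
      if PySem.Str.startswith line new_elem_marker then
        match pvParseMarker new_elem_marker line with
        | none => st                                   -- Python raises here; excluded by Pre_
        | some (name, after) => (st.1.insert name [after], some name)
      else
        match st.2 with
        | none => st
        | some cur => (st.1.modify cur [] (fun v => v ++ [line]), st.2))
    (PySem.Dict.empty, none)
  -- second loop: 'for key, value in out.items(): ... out[key] = new_value' rewrites each value in
  -- place (key positions unchanged), i.e. maps pvJoinA over the items.
  st.1.items.map (fun p => (p.1, pvJoinA p.2))

-- ===== PORT B =====

-- B's _join: map the conditional-space rule over all but the last line, rstrip the last, join once.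
def pvJoinB (acc : List String) : String :=
  PySem.Str.join ""
    (acc.dropLast.map (fun e => if PySem.Str.endswith e "\n" then e else e ++ " ")
      ++ [PySem.Str.rstrip (acc.getLastD "")])

def parse_sio_desc_lines_py_alt (lines : List String) (new_elem_marker : String) : List (String × String) :=
  let st := lines.foldl
    (fun (st : PySem.Dict String String × Option (String × List String)) line =>
      if PySem.Str.startswith line new_elem_marker then
        match pvParseMarker new_elem_marker line with
        | none => st                                   -- Python raises here; excluded by Pre_
        | some (name, after) =>
          (match st.2 with
           | none => st.1
           | some cur => st.1.insert cur.1 (pvJoinB cur.2),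
           some (name, [after]))
      else
        match st.2 with
        | none => st
        | some cur => (st.1, some (cur.1, cur.2 ++ [line])))
    (PySem.Dict.empty, none)
  (match st.2 with
   | none => st.1
   | some cur => st.1.insert cur.1 (pvJoinB cur.2)).items

-- ===== PRECONDITION & SPEC =====

-- Pre_ excludes exactly the inputs where A raises: a line starting with the marker whose
-- whitespace-split tokens do not contain the marker itself (ValueError from tokens.remove),
-- or contain nothing else (IndexError from tokens[0]).
def Pre_parse_sio_desc_lines_py (lines : List String) (new_elem_marker : String) : Prop :=
  ∀ line ∈ lines, PySem.Str.startswith line new_elem_marker = true →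
    new_elem_marker ∈ PySem.Str.split₀ line ∧ 2 ≤ (PySem.Str.split₀ line).length

instance (lines : List String) (new_elem_marker : String) : Decidable (Pre_parse_sio_desc_lines_py lines new_elem_marker) := by unfold Pre_parse_sio_desc_lines_py; infer_instance

def pvWitness_parse_sio_desc_lines_py : List String × String :=
  (["* user - the user name", "continued", "* id - the id"], "*")

def Spec_parse_sio_desc_lines_py (lines : List String) (new_elem_marker : String) (out : List (String × String)) : Prop := out = parse_sio_desc_lines_py_alt lines new_elem_marker
instance (lines : List String) (new_elem_marker : String) (out : List (String × String)) : Decidable (Spec_parse_sio_desc_lines_py lines new_elem_marker out) := by unfold Spec_parse_sio_desc_lines_py; infer_instance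

-- ===== CLAIM (what is proved, stated in full; the proofs are below) =====
def Claim_equal_parse_sio_desc_lines_py : Prop := ∀ (lines : List String) (new_elem_marker : String), Dom_parse_sio_desc_lines_py lines new_elem_marker → Pre_parse_sio_desc_lines_py lines new_elem_marker → Spec_parse_sio_desc_lines_py lines new_elem_marker (parse_sio_desc_lines_py lines new_elem_marker)

-- ===== LEMMAS AND PROOFS =====

theorem pvWitness_ok :
    Dom_parse_sio_desc_lines_py pvWitness_parse_sio_desc_lines_py.1 pvWitness_parse_sio_desc_lines_py.2 ∧
    Pre_parse_sio_desc_lines_py pvWitness_parse_sio_desc_lines_py.1 pvWitness_parse_sio_desc_lines_py.2 := by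
  constructor <;> decide

-- A's indexed join loop over d ++ [x], started at index k with k + d.length = lenValue, appends the
-- conditional-space image of d and then x unchanged.
theorem pvJoinA_loop (n : Nat) (x : String) :
    ∀ (d : List String) (k : Nat) (acc0 : List String), k + d.length = n →
      ((d ++ [x]).foldl
        (fun (st : List String × Nat) elem =>
          (st.1 ++ [if st.2 ≠ n ∧ PySem.Str.endswith elem "\n" = false then elem ++ " " else elem],
           st.2 + 1))
        (acc0, k)).1
      = acc0 ++ d.map (fun e => if PySem.Str.endswith e "\n" then e else e ++ " ") ++ [x] := by
  intro d
  induction d with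
  | nil =>
      intro k acc0 hk
      simp at hk
      subst hk
      simp
  | cons e d ih =>
      intro k acc0 hk
      have hkn : k ≠ n := by simp at hk; omega
      have hstep : (if k ≠ n ∧ PySem.Str.endswith e "\n" = false then e ++ " " else e)
          = (if PySem.Str.endswith e "\n" then e else e ++ " ") := by
        by_cases h : PySem.Chars.endswith e.toList ['\n'] = true <;> simp [h, hkn]
      have := ih (k + 1) (acc0 ++ [if k ≠ n ∧ PySem.Str.endswith e "\n" = false then e ++ " " else e])
        (by simp at hk ⊢; omega)
      simp only [List.cons_append, List.foldl_cons] at *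
      rw [this, hstep]
      simp

theorem pvJoinA_eq_pvJoinB (v : List String) : pvJoinA v = pvJoinB v := by
  unfold pvJoinA pvJoinB
  have h := pvJoinA_loop (v.dropLast.length + 1) (PySem.Str.rstrip (v.getLastD ""))
    v.dropLast 1 [] (by omega)
  simp only [List.length_append, List.length_cons, List.length_nil]
  rw [h]
  simp

-- Inserting corresponding entries preserves 'A's items joined = B's items'.
theorem pvItems_insert (dA : PySem.Dict String (List String)) (dB : PySem.Dict String String)
    (k : String) (v : List String)
    (h : dA.items.map (fun p => (p.1, pvJoinA p.2)) = dB.items) :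
    (dA.insert k v).items.map (fun p => (p.1, pvJoinA p.2)) = (dB.insert k (pvJoinA v)).items := by
  have hkeys : dB.keys = dA.keys := by
    simp only [PySem.Dict.keys, ← h, List.map_map]
    rfl
  have hc : dB.contains k = dA.contains k := by
    rw [PySem.Dict.contains_eq_decide_mem_keys, PySem.Dict.contains_eq_decide_mem_keys, hkeys]
  by_cases hck : dA.contains k = true
  · rw [PySem.Dict.items_insert_of_contains _ _ hck,
      PySem.Dict.items_insert_of_contains _ _ (by rw [hc]; exact hck), ← h]
    simp only [List.map_map]
    apply List.map_congr_left
    intro p _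
    by_cases hp : p.1 = k <;> simp [Function.comp, hp]
  · have hck' : dA.contains k = false := by simpa using hck
    rw [PySem.Dict.items_insert_of_not_contains _ _ hck',
      PySem.Dict.items_insert_of_not_contains _ _ (by rw [hc]; exact hck'), ← h]
    simp

-- Pre_'s per-line condition makes the shared marker-line parse succeed.
theorem pvParseMarker_isSome (new_elem_marker line : String)
    (h1 : new_elem_marker ∈ PySem.Str.split₀ line)
    (h2 : 2 ≤ (PySem.Str.split₀ line).length) :
    ∃ name after, pvParseMarker new_elem_marker line = some (name, after) := by
  unfold pvParseMarker
  rw [PySem.List.remove?_eq_some_erase _ _ h1]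
  have hlen : 1 ≤ ((PySem.Str.split₀ line).erase new_elem_marker).length := by
    rw [List.length_erase_of_mem h1]; omega
  match he : (PySem.Str.split₀ line).erase new_elem_marker with
  | [] => rw [he] at hlen; simp at hlen
  | name :: rest => exact ⟨name, _, rfl⟩

-- The loop invariant between A's state (dict of line-lists, current_elem) and B's state
-- (dict of joined strings, pending (name, lines)).
def pvInv (stA : PySem.Dict String (List String) × Option String)
    (stB : PySem.Dict String String × Option (String × List String)) : Prop :=
  stA.2 = stB.2.map (·.1) ∧
  stA.1.items.map (fun p => (p.1, pvJoinA p.2)) =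
    (match stB.2 with
     | none => stB.1
     | some cur => stB.1.insert cur.1 (pvJoinA cur.2)).items ∧
  (∀ cur ∈ stB.2, stA.1.getD cur.1 [] = cur.2)

theorem pvInv_step (new_elem_marker line : String)
    (hline : PySem.Str.startswith line new_elem_marker = true →
      new_elem_marker ∈ PySem.Str.split₀ line ∧ 2 ≤ (PySem.Str.split₀ line).length)
    (stA : PySem.Dict String (List String) × Option String)
    (stB : PySem.Dict String String × Option (String × List String))
    (hI : pvInv stA stB) :
    pvInv
      (if PySem.Str.startswith line new_elem_marker then
        match pvParseMarker new_elem_marker line with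
        | none => stA
        | some (name, after) => (stA.1.insert name [after], some name)
      else
        match stA.2 with
        | none => stA
        | some cur => (stA.1.modify cur [] (fun v => v ++ [line]), stA.2))
      (if PySem.Str.startswith line new_elem_marker then
        match pvParseMarker new_elem_marker line with
        | none => stB
        | some (name, after) =>
          (match stB.2 with
           | none => stB.1
           | some cur => stB.1.insert cur.1 (pvJoinB cur.2),
           some (name, [after]))
      else
        match stB.2 with
        | none => stB
        | some cur => (stB.1, some (cur.1, cur.2 ++ [line]))) := by
  obtain ⟨dA, curA⟩ := stA
  obtain ⟨dB, curB⟩ := stB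
  obtain ⟨h1, h2, h3⟩ := hI
  simp only at h1 h2 h3
  by_cases hs : PySem.Str.startswith line new_elem_marker = true
  · obtain ⟨hm, hlen⟩ := hline hs
    obtain ⟨name, after, hp⟩ := pvParseMarker_isSome new_elem_marker line hm hlen
    simp only [hs, if_pos, hp]
    refine ⟨rfl, ?_, ?_⟩
    · cases curB with
      | none =>
          simp only at h2 ⊢
          simpa [pvJoinA_eq_pvJoinB] using pvItems_insert dA dB name [after] h2
      | some cur =>
          simp only at h2 ⊢
          simpa [pvJoinA_eq_pvJoinB] using
            pvItems_insert dA (dB.insert cur.1 (pvJoinA cur.2)) name [after] h2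
    · intro cur hcur
      simp only [Option.mem_def, Option.some.injEq] at hcur
      subst hcur
      exact PySem.Dict.getD_insert_self _ _ _ _
  · have hs' : PySem.Str.startswith line new_elem_marker = false := by simpa using hs
    simp only [hs', Bool.false_eq_true, if_neg, not_false_iff]
    cases curB with
    | none =>
        subst h1
        exact ⟨rfl, h2, by simp⟩
    | some cur =>
        subst h1
        have hacc : dA.getD cur.1 [] = cur.2 := h3 cur rfl
        have hmod : (dA.modify cur.1 [] (fun v => v ++ [line]))
            = dA.insert cur.1 (dA.getD cur.1 [] ++ [line]) := rfl
        simp only [Option.map_some]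
        refine ⟨rfl, ?_, ?_⟩
        · simp only at h2 ⊢
          rw [hmod, hacc]
          rw [pvItems_insert dA (dB.insert cur.1 (pvJoinA cur.2)) cur.1 (cur.2 ++ [line]) h2]
          rw [PySem.Dict.insert_insert_self]
        · intro c hc
          simp only [Option.mem_def, Option.some.injEq] at hc
          subst hc
          simp only [hmod, hacc]
          exact PySem.Dict.getD_insert_self _ _ _ _

theorem pvInv_fold (new_elem_marker : String) :
    ∀ (lines : List String),
      (∀ line ∈ lines, PySem.Str.startswith line new_elem_marker = true →
        new_elem_marker ∈ PySem.Str.split₀ line ∧ 2 ≤ (PySem.Str.split₀ line).length) →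
      ∀ stA stB, pvInv stA stB →
      pvInv
        (lines.foldl
          (fun (st : PySem.Dict String (List String) × Option String) line =>
            if PySem.Str.startswith line new_elem_marker then
              match pvParseMarker new_elem_marker line with
              | none => st
              | some (name, after) => (st.1.insert name [after], some name)
            else
              match st.2 with
              | none => st
              | some cur => (st.1.modify cur [] (fun v => v ++ [line]), st.2)) stA)
        (lines.foldl
          (fun (st : PySem.Dict String String × Option (String × List String)) line =>
            if PySem.Str.startswith line new_elem_marker then
              match pvParseMarker new_elem_marker line with
              | none => st
              | some (name, after) =>
                (match st.2 with
                 | none => st.1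
                 | some cur => st.1.insert cur.1 (pvJoinB cur.2),
                 some (name, [after]))
            else
              match st.2 with
              | none => st
              | some cur => (st.1, some (cur.1, cur.2 ++ [line]))) stB) := by
  intro lines
  induction lines with
  | nil => intro _ stA stB h; exact h
  | cons l ls ih =>
      intro hpre stA stB h
      simp only [List.foldl_cons]
      exact ih (fun x hx => hpre x (List.mem_cons_of_mem _ hx)) _ _
        (pvInv_step new_elem_marker l (hpre l (List.mem_cons_self)) stA stB h)

-- ===== VERDICT (by name: the statement is the Claim_ definition above) =====
theorem parse_sio_desc_lines_py_spec : Claim_equal_parse_sio_desc_lines_py := by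
  intro lines new_elem_marker _hdom hpre
  unfold Spec_parse_sio_desc_lines_py parse_sio_desc_lines_py parse_sio_desc_lines_py_alt
  have h := pvInv_fold new_elem_marker lines hpre (PySem.Dict.empty, none) (PySem.Dict.empty, none)
    ⟨rfl, rfl, by simp⟩
  obtain ⟨-, h2, -⟩ := h
  simpa [pvJoinA_eq_pvJoinB] using h2
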